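-- pv_equiv track=rewrite | github.com/Poomon001/Competitive-Programming | club python/Alternating Groups I/main.py | numberOfAlternatingGroups_M3
-- ===== SOURCE A (Python) =====
-- from typing import List
--
-- def numberOfAlternatingGroups_M3(colors: List[int]) -> int:
--     consideration = len(colors) + 1
--     count = 0
--     for i in range(consideration + 1):
--         # not head or tail
--         if i > 0 and i < consideration:
--             i = i % len(colors)
--             j = (i + 1) % len(colors)
--             k = (i - 1) % len(colors)
--             if colors[i] != colors[j] and colors[i] != colors[k]:
--                 count += 1
--     return count
-- ===== SOURCE B (Python) =====
-- def numberOfAlternatingGroups_M3(colors):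
--     n = len(colors)
--     total = 0
--     run = 0          # length of the current maximal run of consecutive differing edges
--     first_run = -1   # length of the run that ends at the first non-differing edge (-1: none seen yet)
--     for i in range(n):
--         if colors[i] != colors[(i + 1) % n]:
--             run += 1
--         elif first_run < 0:
--             first_run = run
--             run = 0
--         else:
--             total += max(run - 1, 0)
--             run = 0
--     if first_run < 0:
--         # every edge differs: the circle is fully alternating
--         return n
--     # the trailing run wraps around the seam and merges with the leading run
--     return total + max(run + first_run - 1, 0)
-- ===== Notes on version B (the rewrite author's own statement) =====
-- stated objective: alternative
-- what changed: Replaces A's per-index triplet test (a padded loop over range(n+2) computing three modular indices and comparing the centre to both neighbours at every step) by run-length encoding of the circular edge-difference sequence: a single fold maintains (total, current run of consecutive differing edges, length of the leading run), each maximal run of length L contributes max(L-1,0) triplets, the trailing run is merged with the leading run across the wrap-around seam, and a fully alternating circle yields n.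
import Mathlib
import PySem

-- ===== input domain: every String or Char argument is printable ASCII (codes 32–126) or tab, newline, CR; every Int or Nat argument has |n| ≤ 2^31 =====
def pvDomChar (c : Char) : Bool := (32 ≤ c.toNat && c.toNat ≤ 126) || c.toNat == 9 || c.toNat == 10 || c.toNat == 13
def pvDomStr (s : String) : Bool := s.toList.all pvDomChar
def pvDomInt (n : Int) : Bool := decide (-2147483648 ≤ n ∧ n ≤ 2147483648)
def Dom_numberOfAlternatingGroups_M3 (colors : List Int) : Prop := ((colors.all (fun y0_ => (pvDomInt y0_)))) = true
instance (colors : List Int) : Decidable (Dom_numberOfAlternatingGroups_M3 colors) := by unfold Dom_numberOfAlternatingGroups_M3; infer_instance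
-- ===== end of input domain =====

-- B replaces A's padded guard loop (three modular indices per step) by run-length encoding of
-- the circular edge-difference sequence: one fold accumulating (total, current run, first run),
-- with the all-alternating circle and the wrap-around seam handled at the end; same O(n) cost.


-- ===== PORT A =====
def numberOfAlternatingGroups_M3 (colors : List Int) : Int :=
  let consideration : Int := (colors.length : Int) + 1
  (PySem.List.pyRange 0 (consideration + 1) 1).foldl
    (fun count i =>
      if i > 0 ∧ i < consideration then
        let i' := PySem.Int.mod i (colors.length : Int)
        let j := PySem.Int.mod (i' + 1) (colors.length : Int)
        let k := PySem.Int.mod (i' - 1) (colors.length : Int)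
        if PySem.List.pyGet? colors i' ≠ PySem.List.pyGet? colors j ∧
           PySem.List.pyGet? colors i' ≠ PySem.List.pyGet? colors k then count + 1
        else count
      else count) 0

-- ===== PORT B =====
-- state (total, run, first_run); at the end: fully-alternating circle → n, else merge the
-- trailing run with the leading run across the seam.
def numberOfAlternatingGroups_M3_alt (colors : List Int) : Int :=
  let n : Int := (colors.length : Int)
  let st : Int × Int × Int :=
    (PySem.List.pyRange 0 n 1).foldl
      (fun s i =>
        if PySem.List.pyGet? colors i ≠ PySem.List.pyGet? colors (PySem.Int.mod (i + 1) n) then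
          (s.1, s.2.1 + 1, s.2.2)
        else if s.2.2 < 0 then
          (s.1, 0, s.2.1)
        else
          (s.1 + max (s.2.1 - 1) 0, 0, s.2.2))
      (0, 0, -1)
  if st.2.2 < 0 then n else st.1 + max (st.2.1 + st.2.2 - 1) 0

-- ===== PRECONDITION & SPEC =====
def Spec_numberOfAlternatingGroups_M3 (colors : List Int) (out : Int) : Prop := out = numberOfAlternatingGroups_M3_alt colors
instance (colors : List Int) (out : Int) : Decidable (Spec_numberOfAlternatingGroups_M3 colors out) := by unfold Spec_numberOfAlternatingGroups_M3; infer_instance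

-- ===== CLAIM (what is proved, stated in full; the proofs are below) =====
def Claim_equal_numberOfAlternatingGroups_M3 : Prop := ∀ (colors : List Int), Dom_numberOfAlternatingGroups_M3 colors → Spec_numberOfAlternatingGroups_M3 colors (numberOfAlternatingGroups_M3 colors)

-- ===== LEMMAS AND PROOFS =====

-- the centre predicate A counts (indices already reduced mod n)
def pvCenter (colors : List Int) (i : Int) : Bool :=
  decide (PySem.List.pyGet? colors i ≠
          PySem.List.pyGet? colors (PySem.Int.mod (i + 1) (colors.length : Int))) &&
  decide (PySem.List.pyGet? colors i ≠
          PySem.List.pyGet? colors (PySem.Int.mod (i - 1) (colors.length : Int)))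

-- the edge-difference bit
def pvDbit (colors : List Int) (i : Int) : Bool :=
  decide (PySem.List.pyGet? colors i ≠
          PySem.List.pyGet? colors (PySem.Int.mod (i + 1) (colors.length : Int)))

-- B's loop body, on the edge bit
def pvStep (s : Int × Int × Int) (b : Bool) : Int × Int × Int :=
  if b then (s.1, s.2.1 + 1, s.2.2)
  else if s.2.2 < 0 then (s.1, 0, s.2.1)
  else (s.1 + max (s.2.1 - 1) 0, 0, s.2.2)

-- pairs added to total by processing es with current run r (runs closed at false edges)
def pvPairs : Int → List Bool → Int
  | _, [] => 0
  | r, true :: es => pvPairs (r + 1) es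
  | r, false :: es => max (r - 1) 0 + pvPairs 0 es

-- trailing run after processing es with current run r
def pvRun : Int → List Bool → Int
  | r, [] => r
  | r, true :: es => pvRun (r + 1) es
  | _, false :: es => pvRun 0 es

-- linear adjacent-true-pair count, with the previous bit as accumulator
def pvGo : Bool → List Bool → Int
  | _, [] => 0
  | prev, b :: es => (if prev && b then 1 else 0) + pvGo b es

def pvLin : List Bool → Int
  | [] => 0
  | b :: es => pvGo b es

def pvSeam (es : List Bool) : Int :=
  if es.head?.getD false && es.getLast?.getD false then 1 else 0

-- circular adjacent-true-pair count
def pvCC (es : List Bool) : Int := pvLin es + pvSeam es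

theorem pvmod_id {i n : Int} (h0 : 0 ≤ i) (h1 : i < n) : PySem.Int.mod i n = i := by
  rw [PySem.Int.mod_eq_emod_of_pos (by omega)]
  exact Int.emod_eq_of_lt h0 h1

theorem pvmod_self {n : Int} (hn : 0 < n) : PySem.Int.mod n n = 0 := by
  rw [PySem.Int.mod_eq_emod_of_pos hn]; exact Int.emod_self

theorem pvmod_neg_one {n : Int} (hn : 0 < n) : PySem.Int.mod (-1) n = n - 1 := by
  rw [PySem.Int.mod_eq_emod_of_pos hn]
  have : (-1 : Int) = (n - 1) + n * (-1) := by ring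
  rw [this, Int.add_mul_emod_self_left]
  exact Int.emod_eq_of_lt (by omega) (by omega)

theorem pvA_count (colors : List Int) (h : colors ≠ []) :
    numberOfAlternatingGroups_M3 colors =
      ((PySem.List.pyRange 0 (colors.length : Int) 1).countP (pvCenter colors) : Int) := by
  have hn : (0:Int) < (colors.length : Int) := by
    have := List.length_pos_iff.mpr h; exact_mod_cast this
  unfold numberOfAlternatingGroups_M3
  set n : Int := (colors.length : Int) with hndef
  show (PySem.List.pyRange 0 (n + 1 + 1) 1).foldl _ 0 = _
  rw [PySem.List.foldl_congr_mem _ _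
    (fun count i => if ((decide (i > 0 ∧ i < n + 1)) &&
        pvCenter colors (PySem.Int.mod i n)) = true then count + 1 else count) 0
    (by
      intro acc x _
      simp only [pvCenter, ← hndef, Bool.and_eq_true, decide_eq_true_eq]
      split_ifs with h1 h2 h3 <;> tauto)]
  rw [PySem.List.foldl_count_if]
  have e1 : PySem.List.pyRange 0 (n + 1 + 1) 1 =
      0 :: (PySem.List.pyRange 1 n 1 ++ [n] ++ [n + 1]) := by
    rw [PySem.List.pyRange_one_cons (by omega), PySem.List.pyRange_one_succ_right (by omega),
        PySem.List.pyRange_one_succ_right (by omega)]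
    norm_num
  have e2 : PySem.List.pyRange 0 n 1 = 0 :: PySem.List.pyRange 1 n 1 :=
    PySem.List.pyRange_one_cons (by omega)
  rw [e1, e2]
  simp only [List.countP_cons, List.countP_append]
  have c0 : (decide ((0:Int) > 0 ∧ (0:Int) < n + 1) && pvCenter colors (PySem.Int.mod 0 n)) = false := by
    simp
  have cn1 : (decide ((n+1:Int) > 0 ∧ (n+1:Int) < n + 1) && pvCenter colors (PySem.Int.mod (n+1) n)) = false := by
    simp
  have cn : (decide ((n:Int) > 0 ∧ (n:Int) < n + 1) && pvCenter colors (PySem.Int.mod n n)) = pvCenter colors 0 := by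
    rw [pvmod_self hn]
    have : (n:Int) > 0 ∧ (n:Int) < n + 1 := ⟨hn, by omega⟩
    simp [this]
  have cmid : List.countP (fun i => decide (i > 0 ∧ i < n + 1) && pvCenter colors (PySem.Int.mod i n))
      (PySem.List.pyRange 1 n 1) = List.countP (pvCenter colors) (PySem.List.pyRange 1 n 1) := by
    apply List.countP_congr
    intro x hx
    rw [PySem.List.mem_pyRange_one] at hx
    rw [pvmod_id (by omega) (by omega)]
    have hd : x > 0 ∧ x < n + 1 := ⟨by omega, by omega⟩
    rw [decide_eq_true hd, Bool.true_and]
  rw [c0, cn1, cn, cmid]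
  cases hc : pvCenter colors 0 <;> simp

-- ---- B-side: the fold after the first false edge ----
theorem pv_fold_post : ∀ (es : List Bool) (t r fr : Int), 0 ≤ fr →
    es.foldl pvStep (t, r, fr) = (t + pvPairs r es, pvRun r es, fr) := by
  intro es
  induction es with
  | nil => intro t r fr _; simp [pvPairs, pvRun]
  | cons b es ih =>
    intro t r fr hfr
    cases b with
    | true => simpa [pvStep, pvPairs, pvRun] using ih t (r + 1) fr hfr
    | false =>
      have : ¬ fr < 0 := by omega
      simpa [pvStep, this, pvPairs, pvRun, add_assoc] using ih (t + max (r - 1) 0) 0 fr hfr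

theorem pvRun_nonneg : ∀ (es : List Bool) (r : Int), 0 ≤ r → 0 ≤ pvRun r es := by
  intro es
  induction es with
  | nil => intro r h; simpa [pvRun] using h
  | cons b es ih =>
    intro r h
    cases b
    · simp only [pvRun]; exact ih 0 le_rfl
    · simp only [pvRun]; exact ih (r + 1) (by omega)

-- linear pairs counted by pvGo = pairs closed at falses + pairs in the trailing run
theorem pv_GG : ∀ (es : List Bool) (prev : Bool) (r : Int),
    (prev = true → 1 ≤ r) → (prev = false → r = 0) →
    pvGo prev es + max (r - 1) 0 = pvPairs r es + max (pvRun r es - 1) 0 := by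
  intro es
  induction es with
  | nil => intro prev r _ _; simp [pvGo, pvPairs, pvRun]
  | cons b es ih =>
    intro prev r h1 h0
    cases b with
    | true =>
      have hr : 0 ≤ r := by
        cases prev
        · rw [h0 rfl]
        · have := h1 rfl; omega
      have ihh := ih true (r + 1) (fun _ => by omega) (by simp)
      simp only [pvGo, pvPairs, pvRun] at ihh ⊢
      cases prev
      · have h0' := h0 rfl; subst h0'; norm_num at ihh ⊢; omega
      · have h1' := h1 rfl; simp only [Bool.true_and, if_true]; omega
    | false =>
      have := ih false 0 (by simp) (fun _ => rfl)
      simp only [pvGo, pvPairs, pvRun] at *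
      cases prev <;> simp_all <;> omega

theorem pv_lastD : ∀ (es : List Bool) (b d : Bool), ((b :: es).getLast?).getD d = es.getLast?.getD b := by
  intro es
  cases es with
  | nil => intro b d; rfl
  | cons x xs =>
    intro b d
    rw [List.getLast?_cons_cons]
    obtain ⟨y, hy⟩ := Option.isSome_iff_exists.mp
      (List.getLast?_isSome.mpr (by simp) : (x :: xs).getLast?.isSome)
    rw [hy]; rfl

theorem pv_RL : ∀ (es : List Bool) (r : Int), 0 ≤ r →
    es.getLast?.getD (decide (0 < r)) = decide (0 < pvRun r es) := by
  intro es
  induction es with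
  | nil => intro r _; simp [pvRun]
  | cons b es ih =>
    intro r hr
    cases b with
    | true =>
      rw [pv_lastD]
      have hd : decide ((0:Int) < r + 1) = true := decide_eq_true (by omega)
      have h2 := ih (r + 1) (by omega)
      rw [hd] at h2
      simpa [pvRun] using h2
    | false =>
      rw [pv_lastD]
      simpa [pvRun] using ih 0 le_rfl

theorem pv_lastApp : ∀ (xs ys : List Bool) (d : Bool), ys ≠ [] →
    ((xs ++ ys).getLast?).getD d = ys.getLast?.getD d := by
  intro xs
  induction xs with
  | nil => intro ys d _; rfl
  | cons x xs ih =>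
    intro ys d h
    rw [List.cons_append, pv_lastD, ih ys x h]
    obtain ⟨y, hy⟩ := Option.isSome_iff_exists.mp
      (List.getLast?_isSome.mpr h : ys.getLast?.isSome)
    rw [hy]; rfl

theorem pv_GRep : ∀ (k : Nat) (es : List Bool),
    pvGo true (List.replicate k true ++ false :: es) = k + pvGo false es := by
  intro k
  induction k with
  | zero => intro es; simp [pvGo]
  | succ k ih => intro es; simp [List.replicate_succ, pvGo, ih]; ring

theorem pv_GRepEnd : ∀ (k : Nat), pvGo true (List.replicate k true) = k := by
  intro k
  induction k with
  | zero => rfl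
  | succ k ih => simp [List.replicate_succ, pvGo, ih]; omega

theorem pv_lastRep : ∀ (a : Nat) (d : Bool),
    ((List.replicate a true).getLast?).getD d = (if a = 0 then d else true) := by
  intro a
  induction a with
  | zero => intro d; rfl
  | succ a ih => intro d; rw [List.replicate_succ, pv_lastD, ih]; cases a <;> simp

-- B's epilogue
def pvVal (st : Int × Int × Int) (m : Int) : Int :=
  if st.2.2 < 0 then m else st.1 + max (st.2.1 + st.2.2 - 1) 0

-- the main loop lemma: value computed by B's loop+epilogue = circular pair count
theorem pv_MAIN : ∀ (es : List Bool) (a : Nat),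
    pvVal (es.foldl pvStep (0, (a : Int), -1)) ((a : Int) + (es.length : Int))
    = pvCC (List.replicate a true ++ es) := by
  intro es
  induction es with
  | nil =>
    intro a
    have hval : pvVal (0, (a : Int), -1) ((a : Int) + (([] : List Bool).length : Int)) = (a : Int) := by
      simp [pvVal]
    rw [List.foldl_nil, hval, List.append_nil]
    cases a with
    | zero => simp [pvCC, pvLin, pvSeam]
    | succ k =>
      have h1 : pvLin (List.replicate (k + 1) true) = (k : Int) := by
        rw [List.replicate_succ]; simp [pvLin, pv_GRepEnd]
      have h2 : pvSeam (List.replicate (k + 1) true) = 1 := by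
        rw [List.replicate_succ, pvSeam, pv_lastD, pv_lastRep]
        cases k
        · simp
        · simp
      rw [pvCC, h1, h2]; push_cast; ring
  | cons b es ih =>
    intro a
    cases b with
    | true =>
      have h := ih (a + 1)
      have hc : ((a + 1 : Nat) : Int) = (a : Int) + 1 := by push_cast; ring
      rw [hc] at h
      have hstep : pvStep (0, (a : Int), -1) true = (0, (a : Int) + 1, -1) := by
        simp [pvStep]
      rw [List.foldl_cons, hstep, List.length_cons]
      rw [show ((a : Int) + ((es.length + 1 : Nat) : Int)) = ((a : Int) + 1) + (es.length : Int) by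
        push_cast; ring]
      rw [h]
      congr 1
      rw [List.replicate_succ', List.append_assoc, List.singleton_append]
    | false =>
      have hstep : pvStep (0, (a : Int), -1) false = (0, 0, (a : Int)) := by
        norm_num [pvStep]
      rw [List.foldl_cons, hstep, pv_fold_post es 0 0 (a : Int) (by positivity)]
      have hTnn : 0 ≤ pvRun 0 es := pvRun_nonneg es 0 le_rfl
      have hval : ∀ m : Int, pvVal (0 + pvPairs 0 es, pvRun 0 es, (a : Int)) m
          = pvPairs 0 es + max (pvRun 0 es + (a : Int) - 1) 0 := by
        intro m
        rw [pvVal, if_neg (by omega : ¬ ((a : Int) < 0))]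
        ring
      rw [hval]
      have hlin : pvLin (List.replicate a true ++ false :: es)
          = max ((a : Int) - 1) 0 + pvGo false es := by
        cases a with
        | zero => norm_num [pvLin]
        | succ k =>
          rw [List.replicate_succ, List.cons_append]
          show pvGo true (List.replicate k true ++ false :: es) = _
          rw [pv_GRep]
          push_cast
          omega
      have hhead : (List.replicate a true ++ false :: es).head?.getD false = decide (0 < a) := by
        cases a with
        | zero => simp
        | succ k => rw [List.replicate_succ]; simp
      have hlast : (List.replicate a true ++ false :: es).getLast?.getD false
          = decide (0 < pvRun 0 es) := by
        rw [pv_lastApp _ _ _ (by simp), pv_lastD]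
        simpa using pv_RL es 0 le_rfl
      have hseam : pvSeam (List.replicate a true ++ false :: es)
          = if decide (0 < a) && decide (0 < pvRun 0 es) then 1 else 0 := by
        rw [pvSeam, hhead, hlast]
      have hgg := pv_GG es false 0 (by simp) (fun _ => rfl)
      norm_num at hgg
      rw [pvCC, hlin, hseam]
      by_cases ha : 0 < a <;> by_cases hT : 0 < pvRun 0 es <;> simp [ha, hT] <;> omega

-- countP over interior indices = linear pair count
theorem pv_getApp : ∀ (es : List Bool) (b : Bool) (i : Int), 0 ≤ i → i < (es.length : Int) →
    PySem.List.pyGet? (es ++ [b]) i = PySem.List.pyGet? es i := by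
  intro es b i h0 h1
  rw [PySem.List.pyGet?_of_nonneg _ h0, PySem.List.pyGet?_of_nonneg _ h0]
  rw [List.getElem?_append_left (by omega)]

theorem pv_GApp : ∀ (es : List Bool) (prev b : Bool),
    pvGo prev (es ++ [b]) = pvGo prev es + (if es.getLast?.getD prev && b then 1 else 0) := by
  intro es
  induction es with
  | nil => intro prev b; simp [pvGo]
  | cons x xs ih => intro prev b; simp only [List.cons_append, pvGo, ih, pv_lastD]; ring

theorem pv_PLapp : ∀ (es : List Bool) (b : Bool),
    pvLin (es ++ [b]) = pvLin es + (if es.getLast?.getD false && b then 1 else 0) := by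
  intro es b
  cases es with
  | nil => simp [pvLin, pvGo]
  | cons x xs => simp only [List.cons_append, pvLin, pv_GApp, pv_lastD]

theorem pv_bridge_lin : ∀ (es : List Bool),
    (List.countP
      (fun i => (PySem.List.pyGet? es i).getD false && (PySem.List.pyGet? es (i - 1)).getD false)
      (PySem.List.pyRange 1 (es.length : Int) 1) : Int) = pvLin es := by
  intro es
  induction es using List.reverseRecOn with
  | nil => rw [List.length_nil, Nat.cast_zero, PySem.List.pyRange_one_eq_nil (by norm_num)]; rfl
  | append_singleton es b ih =>
    rcases Nat.eq_zero_or_pos es.length with h0 | hpos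
    · obtain rfl : es = [] := List.length_eq_zero_iff.mp h0
      rw [List.nil_append, List.length_cons, List.length_nil, Nat.cast_one,
        PySem.List.pyRange_one_eq_nil (by norm_num)]
      rfl
    · have hp : (1 : Int) ≤ (es.length : Int) := by exact_mod_cast hpos
      have hlen : (((es ++ [b]).length : Nat) : Int) = (es.length : Int) + 1 := by
        simp
      rw [hlen, PySem.List.pyRange_one_succ_right (by omega)]
      rw [List.countP_append, List.countP_singleton]
      have hcong : List.countP
          (fun i => (PySem.List.pyGet? (es ++ [b]) i).getD false &&
                    (PySem.List.pyGet? (es ++ [b]) (i - 1)).getD false)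
          (PySem.List.pyRange 1 (es.length : Int) 1)
        = List.countP
          (fun i => (PySem.List.pyGet? es i).getD false &&
                    (PySem.List.pyGet? es (i - 1)).getD false)
          (PySem.List.pyRange 1 (es.length : Int) 1) := by
        apply List.countP_congr
        intro i hi
        rw [PySem.List.mem_pyRange_one] at hi
        rw [pv_getApp es b i (by omega) (by omega), pv_getApp es b (i - 1) (by omega) (by omega)]
      have hb1 : PySem.List.pyGet? (es ++ [b]) (es.length : Int) = some b := by
        rw [PySem.List.pyGet?_of_nonneg _ (by positivity), Int.toNat_natCast,
          List.getElem?_concat_length]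
      have hb2 : PySem.List.pyGet? (es ++ [b]) ((es.length : Int) - 1) = es.getLast? := by
        rw [pv_getApp es b _ (by omega) (by omega), PySem.List.pyGet?_of_nonneg _ (by omega)]
        have ht : ((es.length : Int) - 1).toNat = es.length - 1 := by omega
        rw [ht, ← List.getLast?_eq_getElem?]
      rw [hcong, hb1, hb2, pv_PLapp]
      push_cast
      rw [ih]
      have : ((some b).getD false && es.getLast?.getD false)
           = (es.getLast?.getD false && b) := by
        rw [Option.getD_some, Bool.and_comm]
      rw [this]

-- B = circular pair count of the edge list
theorem pvB_cc (colors : List Int) :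
    numberOfAlternatingGroups_M3_alt colors =
      pvCC ((PySem.List.pyRange 0 (colors.length : Int) 1).map (pvDbit colors)) := by
  have e1 : numberOfAlternatingGroups_M3_alt colors
      = pvVal ((PySem.List.pyRange 0 (colors.length : Int) 1).foldl
          (fun s i =>
            if PySem.List.pyGet? colors i ≠
               PySem.List.pyGet? colors (PySem.Int.mod (i + 1) (colors.length : Int)) then
              (s.1, s.2.1 + 1, s.2.2)
            else if s.2.2 < 0 then (s.1, 0, s.2.1)
            else (s.1 + max (s.2.1 - 1) 0, 0, s.2.2))
          (0, 0, -1)) (colors.length : Int) := rfl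
  have hfold : (PySem.List.pyRange 0 (colors.length : Int) 1).foldl
      (fun s i =>
        if PySem.List.pyGet? colors i ≠
           PySem.List.pyGet? colors (PySem.Int.mod (i + 1) (colors.length : Int)) then
          (s.1, s.2.1 + 1, s.2.2)
        else if s.2.2 < 0 then (s.1, 0, s.2.1)
        else (s.1 + max (s.2.1 - 1) 0, 0, s.2.2))
      ((0 : Int), (0 : Int), (-1 : Int))
    = ((PySem.List.pyRange 0 (colors.length : Int) 1).map (pvDbit colors)).foldl pvStep
        (0, 0, -1) := by
    rw [List.foldl_map]
    apply PySem.List.foldl_congr_mem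
    intro acc x hx
    by_cases hc : PySem.List.pyGet? colors x
        = PySem.List.pyGet? colors (PySem.Int.mod (x + 1) (colors.length : Int))
    · simp [pvStep, pvDbit, hc]
    · simp [pvStep, pvDbit, hc]
  have hlen : ((((PySem.List.pyRange 0 (colors.length : Int) 1).map (pvDbit colors)).length : Nat) : Int)
      = (colors.length : Int) := by
    rw [List.length_map, PySem.List.length_pyRange_one]
    omega
  have h := pv_MAIN ((PySem.List.pyRange 0 (colors.length : Int) 1).map (pvDbit colors)) 0
  rw [Nat.cast_zero, zero_add, hlen] at h
  simp only [List.replicate, List.nil_append] at h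
  rw [e1, hfold, h]

-- circular pair count = A's centre count
theorem pv_cc_center (colors : List Int) (h : colors ≠ []) :
    pvCC ((PySem.List.pyRange 0 (colors.length : Int) 1).map (pvDbit colors)) =
      ((PySem.List.pyRange 0 (colors.length : Int) 1).countP (pvCenter colors) : Int) := by
  have hn : (0 : Int) < (colors.length : Int) := by
    have := List.length_pos_iff.mpr h; exact_mod_cast this
  have hget : ∀ i : Int, 0 ≤ i → i < (colors.length : Int) →
      (PySem.List.pyGet? ((PySem.List.pyRange 0 (colors.length : Int) 1).map (pvDbit colors)) i).getD false
        = pvDbit colors i := by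
    intro i h0 h1
    rw [PySem.List.pyGet?_of_nonneg _ h0]
    have hk : i.toNat < ((PySem.List.pyRange 0 (colors.length : Int) 1)).length := by
      rw [PySem.List.length_pyRange_one]; omega
    rw [List.getElem?_map, List.getElem?_eq_getElem hk, PySem.List.getElem_pyRange_one]
    simp [Int.toNat_of_nonneg h0]
  have hcent : ∀ i : Int, 1 ≤ i → i < (colors.length : Int) →
      pvCenter colors i = (pvDbit colors i && pvDbit colors (i - 1)) := by
    intro i h1 h2
    unfold pvCenter pvDbit
    congr 1
    rw [pvmod_id (by omega) (by omega), show i - 1 + 1 = i by ring,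
      pvmod_id (by omega) (by omega)]
    exact decide_eq_decide.mpr ne_comm
  have hc0 : pvCenter colors 0 = (pvDbit colors 0 && pvDbit colors ((colors.length : Int) - 1)) := by
    unfold pvCenter pvDbit
    congr 1
    rw [show (0 : Int) - 1 = -1 by ring, pvmod_neg_one hn,
      show (colors.length : Int) - 1 + 1 = (colors.length : Int) by ring, pvmod_self hn]
    exact decide_eq_decide.mpr ne_comm
  have hbridge := pv_bridge_lin ((PySem.List.pyRange 0 (colors.length : Int) 1).map (pvDbit colors))
  have hlen : ((((PySem.List.pyRange 0 (colors.length : Int) 1).map (pvDbit colors)).length : Nat) : Int)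
      = (colors.length : Int) := by
    rw [List.length_map, PySem.List.length_pyRange_one]; omega
  rw [hlen] at hbridge
  have hcong : List.countP
      (fun i => (PySem.List.pyGet? ((PySem.List.pyRange 0 (colors.length : Int) 1).map (pvDbit colors)) i).getD false &&
                (PySem.List.pyGet? ((PySem.List.pyRange 0 (colors.length : Int) 1).map (pvDbit colors)) (i - 1)).getD false)
      (PySem.List.pyRange 1 (colors.length : Int) 1)
    = List.countP (pvCenter colors) (PySem.List.pyRange 1 (colors.length : Int) 1) := by
    apply List.countP_congr
    intro i hi
    rw [PySem.List.mem_pyRange_one] at hi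
    rw [hget i (by omega) (by omega), hget (i - 1) (by omega) (by omega),
      hcent i (by omega) (by omega)]
  rw [hcong] at hbridge
  have hhead : ((PySem.List.pyRange 0 (colors.length : Int) 1).map (pvDbit colors)).head?.getD false
      = pvDbit colors 0 := by
    rw [PySem.List.pyRange_one_cons (by omega), List.map_cons]
    rfl
  have hlast : ((PySem.List.pyRange 0 (colors.length : Int) 1).map (pvDbit colors)).getLast?.getD false
      = pvDbit colors ((colors.length : Int) - 1) := by
    have e : PySem.List.pyRange 0 (colors.length : Int) 1
        = PySem.List.pyRange 0 ((colors.length : Int) - 1) 1 ++ [(colors.length : Int) - 1] := by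
      have e2 := PySem.List.pyRange_one_succ_right
        (a := 0) (b := (colors.length : Int) - 1) (by omega)
      rw [show (colors.length : Int) - 1 + 1 = (colors.length : Int) by ring] at e2
      exact e2
    rw [e, List.map_append, List.map_cons, List.map_nil, List.getLast?_concat]
    rfl
  have hseam : pvSeam ((PySem.List.pyRange 0 (colors.length : Int) 1).map (pvDbit colors))
      = if pvCenter colors 0 then 1 else 0 := by
    rw [pvSeam, hhead, hlast, ← hc0]
  have hsplit : ((PySem.List.pyRange 0 (colors.length : Int) 1).countP (pvCenter colors) : Int)
      = ((PySem.List.pyRange 1 (colors.length : Int) 1).countP (pvCenter colors) : Int)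
        + (if pvCenter colors 0 then 1 else 0) := by
    rw [PySem.List.pyRange_one_cons (by omega), List.countP_cons]
    push_cast
    cases pvCenter colors 0 <;> simp
  rw [pvCC, hseam, ← hbridge, hsplit]

-- ===== VERDICT (by name: the statement is the Claim_ definition above) =====
theorem numberOfAlternatingGroups_M3_spec : Claim_equal_numberOfAlternatingGroups_M3 := by
  intro colors _
  unfold Spec_numberOfAlternatingGroups_M3
  rcases colors with _ | ⟨c, cs⟩
  · decide
  · have h : (c :: cs) ≠ [] := by simp
    rw [pvA_count _ h, pvB_cc, pv_cc_center _ h]
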